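-- pv_equiv track=rewrite | github.com/x24labs/Stitch-Agent | stitch_agent/run/filter.py | _matches_allowlist
-- ===== SOURCE A (Python) =====
-- def _matches_allowlist(job_name: str, allowlist: list[str]) -> bool:
--     """Exact match or prefix match with separators (: - _)."""
--     separators = (":", "-", "_")
--     for entry in allowlist:
--         if job_name == entry:
--             return True
--         if (
--             job_name.startswith(entry)
--             and len(job_name) > len(entry)
--             and job_name[len(entry)] in separators
--         ):
--             return True
--     return False
-- ===== SOURCE B (Python) =====
-- def _matches_allowlist(job_name: str, allowlist: list[str]) -> bool:
--     """Exact match or prefix match with separators (: - _)."""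
--     entries = set(allowlist)
--     if job_name in entries:
--         return True
--     prefix = ""
--     for ch in job_name:
--         if ch in ":-_" and prefix in entries:
--             return True
--         prefix += ch
--     return False
-- ===== Notes on version B (the rewrite author's own statement) =====
-- stated objective: alternative
-- what changed: A scans the allowlist entry by entry, testing equality/startswith/next-char against job_name for each entry; B builds a set of the allowlist once and makes a single pass over job_name's characters, looking up the whole name and each separator-cut prefix in that set.
import Mathlib
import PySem

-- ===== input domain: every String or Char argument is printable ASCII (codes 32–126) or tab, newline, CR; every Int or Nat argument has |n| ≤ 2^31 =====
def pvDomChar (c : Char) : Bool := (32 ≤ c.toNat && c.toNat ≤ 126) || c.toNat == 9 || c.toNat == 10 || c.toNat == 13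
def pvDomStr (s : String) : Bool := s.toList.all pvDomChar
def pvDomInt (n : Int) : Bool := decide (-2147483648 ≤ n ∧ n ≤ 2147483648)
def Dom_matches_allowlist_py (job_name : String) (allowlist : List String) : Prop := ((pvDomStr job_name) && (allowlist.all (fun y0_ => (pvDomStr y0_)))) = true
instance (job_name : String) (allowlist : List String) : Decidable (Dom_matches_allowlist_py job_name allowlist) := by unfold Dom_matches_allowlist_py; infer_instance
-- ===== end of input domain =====

-- B replaces A's per-entry scan of the allowlist by a single set built once plus one pass over
-- job_name's characters that looks each separator-cut prefix up in that set (objective: alternative).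

-- ===== PORT A =====
-- `job_name[len(entry)] in separators` (only evaluated after the length guard, so in range)
def pvSepA (c : Char) : Bool := c == ':' || c == '-' || c == '_'

-- the `for entry in allowlist` loop with its two early returns
def pvLoopA (j : List Char) : List (List Char) → Bool
  | [] => false
  | e :: rest =>
    if j == e then true
    else if PySem.Chars.startswith j e && decide (j.length > e.length) &&
            (match PySem.List.pyGet? j (e.length : Int) with
             | some c => pvSepA c
             | none => false) then true
    else pvLoopA j rest

def matches_allowlist_py (job_name : String) (allowlist : List String) : Bool :=
  pvLoopA job_name.toList (allowlist.map String.toList)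

-- ===== PORT B =====
-- `ch in ":-_"`
def pvSepB (c : Char) : Bool := c == ':' || c == '-' || c == '_'

-- the `for ch in job_name` loop, carrying the growing prefix
def pvLoopB (entries : PySem.Set (List Char)) : List Char → List Char → Bool
  | _, [] => false
  | pre, c :: rest =>
    if pvSepB c && PySem.Set.contains entries pre then true
    else pvLoopB entries (pre ++ [c]) rest

def matches_allowlist_py_alt (job_name : String) (allowlist : List String) : Bool :=
  let entries := PySem.Set.ofList (allowlist.map String.toList)
  if PySem.Set.contains entries job_name.toList then true
  else pvLoopB entries [] job_name.toList

-- ===== PRECONDITION & SPEC =====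
def Spec_matches_allowlist_py (job_name : String) (allowlist : List String) (out : Bool) : Prop := out = matches_allowlist_py_alt job_name allowlist
instance (job_name : String) (allowlist : List String) (out : Bool) : Decidable (Spec_matches_allowlist_py job_name allowlist out) := by unfold Spec_matches_allowlist_py; infer_instance

-- ===== CLAIM (what is proved, stated in full; the proofs are below) =====
def Claim_equal_matches_allowlist_py : Prop := ∀ (job_name : String) (allowlist : List String), Dom_matches_allowlist_py job_name allowlist → Spec_matches_allowlist_py job_name allowlist (matches_allowlist_py job_name allowlist)

-- ===== LEMMAS AND PROOFS =====

theorem pvSepB_eq_pvSepA : pvSepB = pvSepA := rfl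

-- characterisation of A's loop
theorem pvLoopA_iff (j : List Char) (L : List (List Char)) :
    pvLoopA j L = true ↔
      ∃ e ∈ L, j = e ∨ ∃ c suf, j = e ++ c :: suf ∧ pvSepA c = true := by
  induction L with
  | nil => simp [pvLoopA]
  | cons e rest ih =>
    simp only [pvLoopA]
    split_ifs with h1 h2
    · simp only [beq_iff_eq] at h1
      simp [h1]
    · simp only [Bool.and_eq_true] at h2
      obtain ⟨⟨hsw, hlen⟩, hget⟩ := h2
      simp only [true_iff]
      refine ⟨e, by simp, Or.inr ?_⟩
      obtain ⟨t, ht⟩ := (PySem.Chars.startswith_iff j e).mp hsw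
      have hlen' : e.length < j.length := by simpa using hlen
      cases t with
      | nil => exact absurd ht (by intro h; rw [← h] at hlen'; simp at hlen')
      | cons c suf =>
        refine ⟨c, suf, ht.symm, ?_⟩
        have hg : PySem.List.pyGet? j (e.length : Int) = some c := by
          rw [← ht]
          exact PySem.List.pyGet?_append_length (pre := e) (y := c) (ys := suf)
        rw [hg] at hget
        exact hget
    · rw [ih]
      constructor
      · rintro ⟨f, hf, hcase⟩; exact ⟨f, by simp [hf], hcase⟩
      · rintro ⟨f, hf, hcase⟩
        rcases List.mem_cons.mp hf with rfl | hmem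
        · exfalso
          rcases hcase with rfl | ⟨c, suf, hj, hsep⟩
          · exact h1 (by simp)
          · apply h2
            simp only [Bool.and_eq_true]
            refine ⟨⟨?_, ?_⟩, ?_⟩
            · exact (PySem.Chars.startswith_iff j f).mpr ⟨c :: suf, hj.symm⟩
            · simp [hj]
            · have hg : PySem.List.pyGet? j (f.length : Int) = some c := by
                rw [hj]
                exact PySem.List.pyGet?_append_length (pre := f) (y := c) (ys := suf)
              rw [hg]; exact hsep
        · exact ⟨f, hmem, hcase⟩

-- characterisation of B's loop
theorem pvLoopB_iff (S : PySem.Set (List Char)) (rest pre : List Char) :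
    pvLoopB S pre rest = true ↔
      ∃ p c suf, rest = p ++ c :: suf ∧ pvSepB c = true ∧
        PySem.Set.contains S (pre ++ p) = true := by
  induction rest generalizing pre with
  | nil =>
    simp only [pvLoopB]
    constructor
    · intro h; cases h
    · rintro ⟨p, c, suf, h, -⟩; cases p <;> simp at h
  | cons c rest ih =>
    simp only [pvLoopB]
    split_ifs with h
    · simp only [Bool.and_eq_true] at h
      obtain ⟨hs, hc⟩ := h
      simp only [true_iff]
      exact ⟨[], c, rest, by simp, hs, by simpa using hc⟩
    · rw [ih]
      constructor
      · rintro ⟨p, c', suf, hr, hs, hc⟩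
        exact ⟨c :: p, c', suf, by simp [hr], hs, by simpa using hc⟩
      · rintro ⟨p, c', suf, hr, hs, hc⟩
        cases p with
        | nil =>
          simp at hr
          exfalso; apply h
          simp only [Bool.and_eq_true]
          exact ⟨hr.1 ▸ hs, by simpa using hc⟩
        | cons d p' =>
          simp at hr
          obtain ⟨rfl, hr'⟩ := hr
          exact ⟨p', c', suf, hr', hs, by simpa using hc⟩

theorem contains_ofList_iff {x : List Char} {L : List (List Char)} :
    PySem.Set.contains (PySem.Set.ofList L) x = true ↔ x ∈ L := by
  simp only [PySem.Set.contains, List.contains_iff_mem]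
  exact PySem.Set.mem_ofList L x

-- ===== VERDICT (by name: the statement is the Claim_ definition above) =====
theorem matches_allowlist_py_spec : Claim_equal_matches_allowlist_py := by
  intro job_name allowlist _
  unfold Spec_matches_allowlist_py matches_allowlist_py matches_allowlist_py_alt
  set j := job_name.toList
  set L := allowlist.map String.toList
  simp only []
  rw [Bool.eq_iff_iff, pvLoopA_iff]
  split_ifs with hin
  · simp only [iff_true]
    exact ⟨j, contains_ofList_iff.mp hin, Or.inl rfl⟩
  · rw [pvLoopB_iff]
    constructor
    · rintro ⟨e, he, rfl | ⟨c, suf, hj, hsep⟩⟩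
      · exact absurd (contains_ofList_iff.mpr he) (by simpa using hin)
      · exact ⟨e, c, suf, hj, by rw [pvSepB_eq_pvSepA]; exact hsep,
          by simpa using contains_ofList_iff.mpr he⟩
    · rintro ⟨p, c, suf, hj, hsep, hc⟩
      refine ⟨p, contains_ofList_iff.mp (by simpa using hc), Or.inr ⟨c, suf, hj, ?_⟩⟩
      rw [← pvSepB_eq_pvSepA]; exact hsep
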